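-- pv_equiv track=rewrite | github.com/krish-modi1/Team2-DR | optimization_fuyao/tictactoe_curve.py | gen_d4_maps
-- ===== SOURCE A (Python) =====
-- from typing import List, Tuple, Dict, Iterable, Optional
--
-- def bit_index(n: int, r: int, c: int) -> int:
--     return r * n + c
--
-- def gen_d4_maps(n: int) -> List[List[int]]:
--     """Generate 8 D4 transforms mapping old index -> new index."""
--     idx = lambda r, c: bit_index(n, r, c)
--     # Identity
--     id_map = [idx(r,c) for r in range(n) for c in range(n)]
--     # Rotations
--     rot90  = [idx(c, n-1-r)   for r in range(n) for c in range(n)]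
--     rot180 = [idx(n-1-r, n-1-c) for r in range(n) for c in range(n)]
--     rot270 = [idx(n-1-c, r)   for r in range(n) for c in range(n)]
--     # Flips
--     flip_h = [idx(r, n-1-c)   for r in range(n) for c in range(n)]  # horizontal
--     flip_v = [idx(n-1-r, c)   for r in range(n) for c in range(n)]  # vertical
--     flip_d = [idx(c, r)       for r in range(n) for c in range(n)]  # main diag
--     flip_a = [idx(n-1-c, n-1-r) for r in range(n) for c in range(n)]# anti diag
--     return [id_map, rot90, rot180, rot270, flip_h, flip_v, flip_d, flip_a]
-- ===== SOURCE B (Python) =====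
-- from typing import List
--
-- def gen_d4_maps(n: int) -> List[List[int]]:
--     """Generate 8 D4 transforms mapping old index -> new index."""
--     m = n * n if n > 0 else 0
--     id_map = list(range(m))
--     # two generators, by closed-form flat-index formulas
--     rot90  = [(i % n) * n + (n - 1 - i // n) for i in range(m)]
--     flip_d = [(i % n) * n + i // n for i in range(m)]
--
--     def compose(p, q):
--         return [p[q[i]] for i in range(m)]
--
--     rot180 = compose(rot90, rot90)
--     rot270 = compose(rot90, rot180)
--     flip_h = compose(rot90, flip_d)
--     flip_v = compose(flip_d, rot90)
--     flip_a = compose(rot90, flip_h)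
--     return [id_map, rot90, rot180, rot270, flip_h, flip_v, flip_d, flip_a]
-- ===== Notes on version B (the rewrite author's own statement) =====
-- stated objective: alternative
-- what changed: Instead of eight independent nested (r,c) comprehensions, B builds only the two D4 generators (rot90 and the main-diagonal flip) by flat-index closed forms and derives the other five non-identity maps by permutation composition p[q[i]].
import Mathlib
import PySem

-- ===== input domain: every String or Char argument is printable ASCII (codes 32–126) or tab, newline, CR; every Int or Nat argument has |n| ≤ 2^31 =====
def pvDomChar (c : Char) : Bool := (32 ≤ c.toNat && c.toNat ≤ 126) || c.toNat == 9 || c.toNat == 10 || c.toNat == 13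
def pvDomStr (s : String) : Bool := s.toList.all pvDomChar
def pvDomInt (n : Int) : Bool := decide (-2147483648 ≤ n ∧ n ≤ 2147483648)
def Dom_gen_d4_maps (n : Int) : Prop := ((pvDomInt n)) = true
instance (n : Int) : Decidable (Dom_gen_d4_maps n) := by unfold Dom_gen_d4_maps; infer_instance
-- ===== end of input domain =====

-- B builds only the two D4 generators by closed-form flat-index formulas and derives
-- the other maps by permutation composition (alternative decomposition, same cost).


-- ===== PORT A =====
def bit_index (n r c : Int) : Int := r * n + c

def gen_d4_maps (n : Int) : List (List Int) :=
  let idx := fun (r c : Int) => bit_index n r c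
  let id_map := (PySem.List.pyRange 0 n 1).flatMap (fun r => (PySem.List.pyRange 0 n 1).map (fun c => idx r c))
  let rot90  := (PySem.List.pyRange 0 n 1).flatMap (fun r => (PySem.List.pyRange 0 n 1).map (fun c => idx c (n-1-r)))
  let rot180 := (PySem.List.pyRange 0 n 1).flatMap (fun r => (PySem.List.pyRange 0 n 1).map (fun c => idx (n-1-r) (n-1-c)))
  let rot270 := (PySem.List.pyRange 0 n 1).flatMap (fun r => (PySem.List.pyRange 0 n 1).map (fun c => idx (n-1-c) r))
  let flip_h := (PySem.List.pyRange 0 n 1).flatMap (fun r => (PySem.List.pyRange 0 n 1).map (fun c => idx r (n-1-c)))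
  let flip_v := (PySem.List.pyRange 0 n 1).flatMap (fun r => (PySem.List.pyRange 0 n 1).map (fun c => idx (n-1-r) c))
  let flip_d := (PySem.List.pyRange 0 n 1).flatMap (fun r => (PySem.List.pyRange 0 n 1).map (fun c => idx c r))
  let flip_a := (PySem.List.pyRange 0 n 1).flatMap (fun r => (PySem.List.pyRange 0 n 1).map (fun c => idx (n-1-c) (n-1-r)))
  [id_map, rot90, rot180, rot270, flip_h, flip_v, flip_d, flip_a]

-- ===== PORT B =====
-- compose(p, q) = [p[q[i]] for i in range(m)]; pyGetD is exact here because
-- every index stays in range (q is a permutation of range(m))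
def pyCompose (m : Int) (p q : List Int) : List Int :=
  (PySem.List.pyRange 0 m 1).map (fun i => PySem.List.pyGetD p (PySem.List.pyGetD q i 0) 0)

def gen_d4_maps_alt (n : Int) : List (List Int) :=
  let m := if 0 < n then n * n else 0
  let id_map := PySem.List.pyRange 0 m 1
  let rot90 := (PySem.List.pyRange 0 m 1).map (fun i => PySem.Int.mod i n * n + (n - 1 - PySem.Int.floordiv i n))
  let flip_d := (PySem.List.pyRange 0 m 1).map (fun i => PySem.Int.mod i n * n + PySem.Int.floordiv i n)
  let rot180 := pyCompose m rot90 rot90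
  let rot270 := pyCompose m rot90 rot180
  let flip_h := pyCompose m rot90 flip_d
  let flip_v := pyCompose m flip_d rot90
  let flip_a := pyCompose m rot90 flip_h
  [id_map, rot90, rot180, rot270, flip_h, flip_v, flip_d, flip_a]

-- ===== PRECONDITION & SPEC =====
def Spec_gen_d4_maps (n : Int) (out : List (List Int)) : Prop := out = gen_d4_maps_alt n
instance (n : Int) (out : List (List Int)) : Decidable (Spec_gen_d4_maps n out) := by unfold Spec_gen_d4_maps; infer_instance

-- ===== CLAIM (what is proved, stated in full; the proofs are below) =====
def Claim_equal_gen_d4_maps : Prop := ∀ (n : Int), Dom_gen_d4_maps n → Spec_gen_d4_maps n (gen_d4_maps n)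

-- ===== LEMMAS AND PROOFS =====

-- Nat-level flattening of a nested comprehension into one flat range with div/mod
theorem flatMap_range_eq_range_mul {α : Type} (R C : Nat) (f : Nat → Nat → α) :
    (List.range R).flatMap (fun r => (List.range C).map (f r)) =
    (List.range (R * C)).map (fun i => f (i / C) (i % C)) := by
  induction R with
  | zero => simp
  | succ R ih =>
      rw [List.range_succ, List.flatMap_append, ih, Nat.succ_mul, List.range_add,
        List.map_append, List.map_map, List.flatMap_singleton]
      congr 1
      apply List.map_congr_left
      intro k hk
      have hkC : k < C := List.mem_range.mp hk
      have hC : 0 < C := by omega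
      have h1 : (R * C + k) / C = R := by
        rw [Nat.mul_comm R C, Nat.mul_add_div hC, Nat.div_eq_of_lt hkC]
        omega
      have h2 : (R * C + k) % C = k := by
        rw [Nat.mul_comm R C, Nat.mul_add_mod, Nat.mod_eq_of_lt hkC]
      simp only [Function.comp_def]
      rw [h1, h2]


-- A's nested comprehension over r,c equals a flat map over range(n*n) with i/n, i%n
theorem nested_eq_flat (n : Int) (hn : 0 ≤ n) (f : Int → Int → Int) :
    (PySem.List.pyRange 0 n 1).flatMap (fun r => (PySem.List.pyRange 0 n 1).map (fun c => f r c)) =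
    (PySem.List.pyRange 0 (n * n) 1).map (fun i => f (i / n) (i % n)) := by
  obtain ⟨N, rfl⟩ := Int.eq_ofNat_of_zero_le hn
  rw [PySem.List.pyRange_one, PySem.List.pyRange_one,
    show ((N : Int) * N - 0).toNat = N * N from by simp [Int.toNat_mul],
    show ((N : Int) - 0).toNat = N from by simp]
  simp only [zero_add, List.flatMap_map, List.map_map, Function.comp_def]
  rw [flatMap_range_eq_range_mul N N (fun r c => f (r : Int) (c : Int))]
  apply List.map_congr_left
  intro i _
  have h1 : ((i / N : Nat) : Int) = (i : Int) / (N : Int) := by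
    exact_mod_cast Int.natCast_ediv i N
  have h2 : ((i % N : Nat) : Int) = (i : Int) % (N : Int) := by push_cast; ring
  rw [h1, h2]

-- div/mod of a*n+b for 0 ≤ b < n
theorem divmod_mk (n a b : Int) (hb0 : 0 ≤ b) (hbn : b < n) :
    (a * n + b) / n = a ∧ (a * n + b) % n = b := by
  have hn : 0 < n := lt_of_le_of_lt hb0 hbn
  constructor
  · rw [add_comm, Int.add_mul_ediv_right _ _ (ne_of_gt hn), Int.ediv_eq_zero_of_lt hb0 hbn,
      zero_add]
  · rw [add_comm]
    simp [Int.emod_eq_of_lt hb0 hbn]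

-- a*n+b lies in [0, n*n) when a,b do in [0,n)
theorem mk_bounds (n a b : Int) (ha0 : 0 ≤ a) (han : a < n) (hb0 : 0 ≤ b) (hbn : b < n) :
    0 ≤ a * n + b ∧ a * n + b < n * n := by
  have hn : 0 < n := lt_of_le_of_lt hb0 hbn
  constructor
  · positivity
  · nlinarith

-- composing two mapped ranges gives the mapped composition
theorem pyCompose_map (m : Int) (hp hq : Int → Int)
    (hrange : ∀ i, 0 ≤ i → i < m → 0 ≤ hq i ∧ hq i < m) :
    pyCompose m ((PySem.List.pyRange 0 m 1).map hp) ((PySem.List.pyRange 0 m 1).map hq) =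
    (PySem.List.pyRange 0 m 1).map (fun i => hp (hq i)) := by
  unfold pyCompose
  apply List.map_congr_left
  intro i hi
  obtain ⟨hi0, him⟩ := (PySem.List.mem_pyRange_one).mp hi
  obtain ⟨hq0, hqm⟩ := hrange i hi0 him
  rw [PySem.List.pyGetD_map_pyRange_of_nonneg hq m i 0 hi0 him,
      PySem.List.pyGetD_map_pyRange_of_nonneg hp m (hq i) 0 hq0 hqm]

theorem gen_d4_maps_eq (n : Int) : gen_d4_maps n = gen_d4_maps_alt n := by
  by_cases hpos : 0 < n
  case neg =>
    have hn0 : n ≤ 0 := by omega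
    simp [gen_d4_maps, gen_d4_maps_alt, pyCompose, if_neg (by omega : ¬ 0 < n),
      PySem.List.pyRange_one_eq_nil hn0, PySem.List.pyRange_one_eq_nil (le_refl (0 : Int))]
  have hn : 0 ≤ n := hpos.le
  have hne : n ≠ 0 := ne_of_gt hpos
  simp only [gen_d4_maps, gen_d4_maps_alt, bit_index, if_pos hpos]
  -- B's generator formulas with floordiv/mod rewritten to ediv/emod
  simp only [PySem.Int.floordiv_eq_ediv_of_pos hpos, PySem.Int.mod_eq_emod_of_pos hpos]
  -- name the two generator functions
  set f90 : Int → Int := fun i => i % n * n + (n - 1 - i / n) with hf90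
  set fd : Int → Int := fun i => i % n * n + i / n with hfd
  -- range facts for div/mod of i ∈ [0, n*n)
  have hdm : ∀ i : Int, 0 ≤ i → i < n * n →
      0 ≤ i / n ∧ i / n < n ∧ 0 ≤ i % n ∧ i % n < n := by
    intro i hi0 him
    refine ⟨Int.ediv_nonneg hi0 (le_of_lt hpos), (Int.ediv_lt_iff_lt_mul hpos).mpr him,
      Int.emod_nonneg i hne, Int.emod_lt_of_pos i hpos⟩
  have h90r : ∀ i, 0 ≤ i → i < n * n → 0 ≤ f90 i ∧ f90 i < n * n := by
    intro i hi0 him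
    obtain ⟨hr0, hrn, hc0, hcn⟩ := hdm i hi0 him
    exact mk_bounds n (i % n) (n - 1 - i / n) hc0 hcn (by omega) (by omega)
  have hdr : ∀ i, 0 ≤ i → i < n * n → 0 ≤ fd i ∧ fd i < n * n := by
    intro i hi0 him
    obtain ⟨hr0, hrn, hc0, hcn⟩ := hdm i hi0 him
    exact mk_bounds n (i % n) (i / n) hc0 hcn hr0 hrn
  -- rewrite the compositions into single maps
  rw [pyCompose_map (n*n) f90 f90 h90r]
  rw [pyCompose_map (n*n) f90 (fun i => f90 (f90 i))
      (fun i h1 h2 => h90r (f90 i) (h90r i h1 h2).1 (h90r i h1 h2).2)]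
  rw [pyCompose_map (n*n) f90 fd hdr]
  rw [pyCompose_map (n*n) fd f90 h90r]
  rw [pyCompose_map (n*n) f90 (fun i => f90 (fd i))
      (fun i h1 h2 => h90r (fd i) (hdr i h1 h2).1 (hdr i h1 h2).2)]
  -- now prove the eight lists equal, each A list flattened
  congr 1
  · -- identity
    rw [nested_eq_flat n hn]
    conv_rhs => rw [show PySem.List.pyRange 0 (n*n) 1 = (PySem.List.pyRange 0 (n*n) 1).map id by simp]
    apply List.map_congr_left
    intro i hi
    obtain ⟨hi0, him⟩ := (PySem.List.mem_pyRange_one).mp hi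
    rw [id_eq, Int.ediv_mul_add_emod]
  congr 1
  · -- rot90 = generator formula
    rw [nested_eq_flat n hn]
  congr 1
  · -- rot180 = f90 ∘ f90
    rw [nested_eq_flat n hn]
    apply List.map_congr_left
    intro i hi
    obtain ⟨hi0, him⟩ := (PySem.List.mem_pyRange_one).mp hi
    obtain ⟨hr0, hrn, hc0, hcn⟩ := hdm i hi0 him
    simp only [hf90]
    obtain ⟨hd, hm⟩ := divmod_mk n (i % n) (n - 1 - i / n) (by omega) (by omega)
    rw [hd, hm]
  congr 1
  · -- rot270 = f90 ∘ f90 ∘ f90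
    rw [nested_eq_flat n hn]
    apply List.map_congr_left
    intro i hi
    obtain ⟨hi0, him⟩ := (PySem.List.mem_pyRange_one).mp hi
    obtain ⟨hr0, hrn, hc0, hcn⟩ := hdm i hi0 him
    simp only [hf90]
    obtain ⟨hd1, hm1⟩ := divmod_mk n (i % n) (n - 1 - i / n) (by omega) (by omega)
    rw [hd1, hm1]
    obtain ⟨hd2, hm2⟩ := divmod_mk n (n - 1 - i / n) (n - 1 - i % n) (by omega) (by omega)
    rw [hd2, hm2]
    ring_nf
  congr 1
  · -- flip_h = f90 ∘ fd
    rw [nested_eq_flat n hn]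
    apply List.map_congr_left
    intro i hi
    obtain ⟨hi0, him⟩ := (PySem.List.mem_pyRange_one).mp hi
    obtain ⟨hr0, hrn, hc0, hcn⟩ := hdm i hi0 him
    simp only [hf90, hfd]
    obtain ⟨hd, hm⟩ := divmod_mk n (i % n) (i / n) (by omega) (by omega)
    rw [hd, hm]
  congr 1
  · -- flip_v = fd ∘ f90
    rw [nested_eq_flat n hn]
    apply List.map_congr_left
    intro i hi
    obtain ⟨hi0, him⟩ := (PySem.List.mem_pyRange_one).mp hi
    obtain ⟨hr0, hrn, hc0, hcn⟩ := hdm i hi0 him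
    simp only [hf90, hfd]
    obtain ⟨hd, hm⟩ := divmod_mk n (i % n) (n - 1 - i / n) (by omega) (by omega)
    rw [hd, hm]
  congr 1
  · -- flip_d = generator formula
    rw [nested_eq_flat n hn]
  · -- flip_a = f90 ∘ f90 ∘ fd
    congr 1
    rw [nested_eq_flat n hn]
    apply List.map_congr_left
    intro i hi
    obtain ⟨hi0, him⟩ := (PySem.List.mem_pyRange_one).mp hi
    obtain ⟨hr0, hrn, hc0, hcn⟩ := hdm i hi0 him
    simp only [hf90, hfd]
    obtain ⟨hd1, hm1⟩ := divmod_mk n (i % n) (i / n) (by omega) (by omega)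
    rw [hd1, hm1]
    obtain ⟨hd2, hm2⟩ := divmod_mk n (i / n) (n - 1 - i % n) (by omega) (by omega)
    rw [hd2, hm2]

-- ===== VERDICT (by name: the statement is the Claim_ definition above) =====
theorem gen_d4_maps_spec : Claim_equal_gen_d4_maps := by
  intro n _
  exact gen_d4_maps_eq n
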